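-- pv_equiv track=rewrite | github.com/Subbs264/Finalised-Cinema-Booking-System | customtkinter_school_proj/proj_main/logic.py | check_gap
-- ===== SOURCE A (Python) =====
-- def check_gap(chosen_seats, booked_seats, rows='ABCDEFGHIJ', cols=20):
--     '''Returns True if booking these seats would leave a single empty seat stranded between occupied seats in any row'''
--     occupied = set(chosen_seats) | set(booked_seats)    # combines sets
--
--     for row in rows:
--         for col in range(1, cols + 1):
--             seat = f'{row}{col}'
--             if seat in occupied:
--                 continue
--
--             left_seat_occupied = col == 1 or f'{row}{col - 1}' in occupied
--             right_seat_occupied = col == cols or f'{row}{col + 1}' in occupied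
--
--             if left_seat_occupied and right_seat_occupied:
--                 return True, seat
--
--     return False, None
-- ===== SOURCE B (Python) =====
-- def check_gap(chosen_seats, booked_seats, rows='ABCDEFGHIJ', cols=20):
--     '''Gap-walk reformulation: scan each row's occupied columns in order (with
--     sentinel walls at 0 and cols+1) and report the first pair of consecutive
--     occupied positions exactly two apart.'''
--     occupied = set(chosen_seats) | set(booked_seats)
--     for row in rows:
--         occ_cols = [c for c in range(1, cols + 1) if f'{row}{c}' in occupied]
--         prev = 0
--         for cur in occ_cols + [cols + 1]:
--             if cur - prev == 2:
--                 return True, f'{row}{prev + 1}'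
--             prev = cur
--     return False, None
-- ===== Notes on version B (the rewrite author's own statement) =====
-- stated objective: alternative
-- what changed: A tests every empty cell by formatting and looking up three seat strings (itself and both neighbours); B builds each row's (already sorted) occupied-column list once and walks consecutive occupied positions with sentinel walls 0 and cols+1, reporting the first pair exactly two apart.
import Mathlib
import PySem

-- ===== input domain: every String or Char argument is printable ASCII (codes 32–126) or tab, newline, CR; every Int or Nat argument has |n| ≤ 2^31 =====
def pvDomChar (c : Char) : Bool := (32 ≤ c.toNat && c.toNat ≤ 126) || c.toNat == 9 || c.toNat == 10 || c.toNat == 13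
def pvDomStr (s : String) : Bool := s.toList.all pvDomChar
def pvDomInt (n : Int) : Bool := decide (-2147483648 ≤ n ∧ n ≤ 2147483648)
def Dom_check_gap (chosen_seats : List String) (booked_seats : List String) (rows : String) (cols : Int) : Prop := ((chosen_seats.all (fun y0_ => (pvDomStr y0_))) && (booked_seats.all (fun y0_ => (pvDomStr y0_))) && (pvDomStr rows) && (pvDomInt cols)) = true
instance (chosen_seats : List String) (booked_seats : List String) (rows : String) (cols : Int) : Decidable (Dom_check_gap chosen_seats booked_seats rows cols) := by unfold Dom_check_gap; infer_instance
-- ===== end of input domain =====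

-- B replaces A's per-cell neighbour test by a walk over each row's occupied columns
-- (sentinels 0 and cols+1), firing on the first consecutive pair exactly 2 apart
-- (objective: alternative decomposition; return value only, no mutation in either).

-- f'{row}{col}' (shared f-string helper of both ports)
def pySeat (row : Char) (c : Int) : String := String.mk (row :: PySem.Int.toChars c)

-- ===== PORT A =====
def checkRowA (occupied : List String) (row : Char) (cols : Int) : List Int → Option String
  | [] => none
  | c :: rest =>
    let seat := pySeat row c
    if PySem.Set.contains occupied seat then checkRowA occupied row cols rest
    else
      let left_seat_occupied := (c == 1) || PySem.Set.contains occupied (pySeat row (c - 1))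
      let right_seat_occupied := (c == cols) || PySem.Set.contains occupied (pySeat row (c + 1))
      if left_seat_occupied && right_seat_occupied then some seat
      else checkRowA occupied row cols rest

def checkRowsA (occupied : List String) (cols : Int) : List Char → Bool × Option String
  | [] => (false, none)
  | row :: rs =>
    match checkRowA occupied row cols (PySem.List.pyRange 1 (cols + 1) 1) with
    | some seat => (true, some seat)
    | none => checkRowsA occupied cols rs

def check_gap (chosen_seats : List String) (booked_seats : List String) (rows : String) (cols : Int) : Bool × Option String :=
  checkRowsA (PySem.Set.union (PySem.Set.ofList chosen_seats) booked_seats) cols rows.toList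

-- ===== PORT B =====
-- walk consecutive occupied positions; fire when they are exactly two apart
def walkGaps (row : Char) : Int → List Int → Option String
  | _, [] => none
  | prev, cur :: rest =>
    if cur - prev == 2 then some (pySeat row (prev + 1)) else walkGaps row cur rest

def checkRowB (occupied : List String) (row : Char) (cols : Int) : Option String :=
  let occ_cols := (PySem.List.pyRange 1 (cols + 1) 1).filter
    (fun c => PySem.Set.contains occupied (pySeat row c))
  walkGaps row 0 (occ_cols ++ [cols + 1])

def checkRowsB (occupied : List String) (cols : Int) : List Char → Bool × Option String
  | [] => (false, none)
  | row :: rs =>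
    match checkRowB occupied row cols with
    | some seat => (true, some seat)
    | none => checkRowsB occupied cols rs

def check_gap_alt (chosen_seats : List String) (booked_seats : List String) (rows : String) (cols : Int) : Bool × Option String :=
  checkRowsB (PySem.Set.union (PySem.Set.ofList chosen_seats) booked_seats) cols rows.toList

-- ===== PRECONDITION & SPEC =====
def Spec_check_gap (chosen_seats : List String) (booked_seats : List String) (rows : String) (cols : Int) (out : Bool × Option String) : Prop := out = check_gap_alt chosen_seats booked_seats rows cols
instance (chosen_seats : List String) (booked_seats : List String) (rows : String) (cols : Int) (out : Bool × Option String) : Decidable (Spec_check_gap chosen_seats booked_seats rows cols out) := by unfold Spec_check_gap; infer_instance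

-- ===== CLAIM (what is proved, stated in full; the proofs are below) =====
def Claim_equal_check_gap : Prop := ∀ (chosen_seats : List String) (booked_seats : List String) (rows : String) (cols : Int), Dom_check_gap chosen_seats booked_seats rows cols → Spec_check_gap chosen_seats booked_seats rows cols (check_gap chosen_seats booked_seats rows cols)

-- ===== LEMMAS AND PROOFS =====

-- membership of seat (row, c) in A's occupied set
def occB (occupied : List String) (row : Char) (c : Int) : Bool :=
  PySem.Set.contains occupied (pySeat row c)

-- A's per-cell test
def PbA (occupied : List String) (row : Char) (cols : Int) (c : Int) : Bool :=
  !occB occupied row c &&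
    (((c == 1) || occB occupied row (c - 1)) && ((c == cols) || occB occupied row (c + 1)))

lemma checkRowA_eq_find (occupied : List String) (row : Char) (cols : Int) :
    ∀ l : List Int,
      checkRowA occupied row cols l = (l.find? (PbA occupied row cols)).map (pySeat row) := by
  intro l
  induction l with
  | nil => simp [checkRowA]
  | cons c rest ih =>
    simp only [checkRowA, List.find?, PbA, occB]
    by_cases h1 : pySeat row c ∈ occupied
    · simp [PySem.Set.contains, h1, ih]
    · by_cases hL : c = 1 ∨ pySeat row (c - 1) ∈ occupied
      · by_cases hR : c = cols ∨ pySeat row (c + 1) ∈ occupied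
        · rcases hL with h | h <;> rcases hR with h' | h' <;> subst_eqs <;>
            (try norm_num at *) <;> simp_all
        · rcases hL with h | h <;> subst_eqs <;> (try norm_num at *) <;>
            obtain ⟨hR1, hR2⟩ := hR <;>
            simp_all [beq_eq_false_iff_ne.mpr hR1]
      · rw [not_or] at hL
        obtain ⟨hL1, hL2⟩ := hL
        simp_all [PySem.Set.contains, beq_eq_false_iff_ne.mpr hL1]

-- the central alignment invariant between A's scan (at cell a) and B's gap walk (at prev p)
lemma walk_align (occupied : List String) (row : Char) (cols : Int) :
    ∀ (n : Nat) (a p : Int), (cols + 1 - a).toNat = n → 0 ≤ p → p < a → a ≤ cols + 1 →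
      (p = 0 ∨ occB occupied row p = true) →
      (∀ x, p < x → x < a → occB occupied row x = false) →
      (p + 2 ≤ a → p + 1 < cols ∧ (a ≤ cols → occB occupied row a = false)) →
      ((PySem.List.pyRange a (cols + 1) 1).find? (PbA occupied row cols)).map (pySeat row)
        = walkGaps row p
            (((PySem.List.pyRange a (cols + 1) 1).filter (fun c => occB occupied row c)) ++ [cols + 1]) := by
  intro n
  induction n using Nat.strong_induction_on with
  | _ n ih =>
    intro a p hn hp0 hpa hac hop hgap hH
    by_cases hend : a = cols + 1
    · subst hend
      rw [PySem.List.pyRange_one_eq_nil (le_refl _)]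
      have hne : cols + 1 - p ≠ 2 := by
        rcases (by omega : p + 1 = cols + 1 ∨ p + 2 ≤ cols + 1) with h | h
        · omega
        · have := (hH h).1; omega
      simp [walkGaps, beq_eq_false_iff_ne.mpr hne]
    · have halt : a < cols + 1 := lt_of_le_of_ne hac hend
      rw [PySem.List.pyRange_one_cons halt]
      by_cases hoa : occB occupied row a = true
      · -- cell a occupied: both sides step to prev := a
        have hpa1 : a = p + 1 := by
          by_contra hneq
          have := (hH (by omega)).2 (by omega)
          simp [this] at hoa
        have hPb : PbA occupied row cols a = false := by simp [PbA, hoa]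
        rw [List.find?_cons_of_neg (by simp [hPb]),
            List.filter_cons_of_pos (by simpa using hoa)]
        have hfire : a - p ≠ 2 := by omega
        rw [List.cons_append]
        show _ = (if (a - p == 2) = true then _ else walkGaps row a _)
        rw [if_neg (by simp [beq_eq_false_iff_ne.mpr hfire])]
        exact ih _ (by omega) (a + 1) a rfl (by omega) (by omega) (by omega) (Or.inr hoa)
          (fun x h1 h2 => ((by omega : False).elim))
          (fun h => ((by omega : False).elim))
      · have hoaf : occB occupied row a = false := by simpa using hoa
        rw [List.filter_cons_of_neg (by simp [hoaf])]
        by_cases hphase : a = p + 1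
        · have hleft : ((a == 1) || occB occupied row (a - 1)) = true := by
            rcases hop with h0 | hocc
            · have : a = 1 := by omega
              simp [this]
            · have : a - 1 = p := by omega
              rw [this]; simp [hocc]
          by_cases hr : ((a == cols) || occB occupied row (a + 1)) = true
          · -- A fires at a; the walk fires on the pair (p, p+2)
            have hPb : PbA occupied row cols a = true := by
              simp only [PbA, hoaf, hleft, hr, Bool.not_false, Bool.and_self]
            rw [List.find?_cons_of_pos hPb]
            by_cases hacols : a = cols
            · rw [PySem.List.pyRange_one_eq_nil (by omega)]
              simp only [List.filter_nil, List.nil_append]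
              show _ = (if (cols + 1 - p == 2) = true then some (pySeat row (p + 1)) else _)
              rw [if_pos (by simp [beq_iff_eq]; omega), show p + 1 = a by omega]
              rfl
            · have hocc1 : occB occupied row (a + 1) = true := by
                simpa [beq_eq_false_iff_ne.mpr hacols] using hr
              rw [PySem.List.pyRange_one_cons (by omega),
                  List.filter_cons_of_pos (by simpa using hocc1), List.cons_append]
              show _ = (if (a + 1 - p == 2) = true then some (pySeat row (p + 1)) else _)
              rw [if_pos (by simp [beq_iff_eq]; omega), show p + 1 = a by omega]
              rfl
          · -- A passes the empty cell a; its right neighbour is empty too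
            have hr' : (a == cols) = false ∧ occB occupied row (a + 1) = false := by
              simpa using hr
            have hPb : PbA occupied row cols a = false := by
              simp [PbA, hr'.1, hr'.2]
            rw [List.find?_cons_of_neg (by simp [hPb])]
            have hacols : a ≠ cols := by simpa [beq_eq_false_iff_ne] using hr'.1
            refine ih _ (by omega) (a + 1) p rfl hp0 (by omega) (by omega) hop ?_ ?_
            · intro x h1 h2
              rcases (by omega : x < a ∨ x = a) with h | h
              · exact hgap x h1 h
              · rw [h]; exact hoaf
            · intro _
              exact ⟨by omega, fun _ => hr'.2⟩
        · -- dead zone: a ≥ p + 2, left neighbour of a is empty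
          have hge : p + 2 ≤ a := by omega
          have hPb : PbA occupied row cols a = false := by
            have h1 : (a == 1) = false := beq_eq_false_iff_ne.mpr (by omega)
            have h2 : occB occupied row (a - 1) = false := hgap _ (by omega) (by omega)
            simp [PbA, h1, h2]
          rw [List.find?_cons_of_neg (by simp [hPb])]
          by_cases hacols : a = cols
          · refine ih _ (by omega) (a + 1) p rfl hp0 (by omega) (by omega) hop ?_ ?_
            · intro x h1 h2
              rcases (by omega : x < a ∨ x = a) with h | h
              · exact hgap x h1 h
              · rw [h]; exact hoaf
            · intro _
              exact ⟨(hH hge).1, fun h => ((by omega : False).elim)⟩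
          · by_cases hnext : occB occupied row (a + 1) = true
            · -- next cell occupied: both sides resynchronise at prev := a + 1
              rw [PySem.List.pyRange_one_cons (by omega),
                  List.filter_cons_of_pos (by simpa using hnext),
                  List.find?_cons_of_neg (by simp [PbA, hnext]), List.cons_append]
              have hfire : a + 1 - p ≠ 2 := by omega
              show _ = (if (a + 1 - p == 2) = true then _ else walkGaps row (a + 1) _)
              rw [if_neg (by simp [beq_eq_false_iff_ne.mpr hfire])]
              exact ih _ (by omega) (a + 1 + 1) (a + 1) rfl (by omega) (by omega) (by omega)
                (Or.inr hnext) (fun x h1 h2 => ((by omega : False).elim))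
                (fun h => ((by omega : False).elim))
            · have hnf : occB occupied row (a + 1) = false := by simpa using hnext
              refine ih _ (by omega) (a + 1) p rfl hp0 (by omega) (by omega) hop ?_ ?_
              · intro x h1 h2
                rcases (by omega : x < a ∨ x = a) with h | h
                · exact hgap x h1 h
                · rw [h]; exact hoaf
              · intro _
                exact ⟨(hH hge).1, fun _ => hnf⟩

lemma rowEq (occupied : List String) (row : Char) (cols : Int) :
    checkRowA occupied row cols (PySem.List.pyRange 1 (cols + 1) 1) = checkRowB occupied row cols := by
  rw [checkRowA_eq_find]
  show _ = walkGaps row 0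
      (((PySem.List.pyRange 1 (cols + 1) 1).filter
        (fun c => PySem.Set.contains occupied (pySeat row c))) ++ [cols + 1])
  by_cases hc : 0 ≤ cols
  · exact walk_align occupied row cols _ 1 0 rfl (le_refl 0) (by omega) (by omega)
      (Or.inl rfl) (fun x h1 h2 => ((by omega : False).elim)) (fun h => ((by omega : False).elim))
  · rw [PySem.List.pyRange_one_eq_nil (by omega)]
    have hne : cols + 1 ≠ 2 := by omega
    simp [walkGaps, beq_eq_false_iff_ne.mpr hne]

lemma rowsEq (occupied : List String) (cols : Int) :
    ∀ l : List Char, checkRowsA occupied cols l = checkRowsB occupied cols l := by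
  intro l
  induction l with
  | nil => rfl
  | cons r rs ih =>
    simp only [checkRowsA, checkRowsB, rowEq, ih]

-- ===== VERDICT (by name: the statement is the Claim_ definition above) =====
theorem check_gap_spec : Claim_equal_check_gap := by
  intro chosen booked rows cols _
  unfold Spec_check_gap check_gap check_gap_alt
  exact rowsEq _ _ _
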